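-- pv_equiv track=rewrite | github.com/Garett-L/ToyAndStationery | services/email-parser/email_parser.py | _find_signature_position_in_html
-- ===== SOURCE A (Python) =====
-- def _find_signature_position_in_html(html_body: str) -> int:
--     """
--     找到HTML正文中签名的起始位置
--
--     策略：找到真正的签名关键词（不是 "thanks" 这种模糊的），
--     然后保留这个签名之前的所有图片
--
--     Args:
--         html_body: HTML正文
--
--     Returns:
--         签名在HTML中的字符位置，如果没有找到则返回 -1
--     """
--     if not html_body:
--         return -1
--
--     # 跳过 HTML <head> 部分
--     body_start = html_body.lower().find("<body")
--     search_start = body_start if body_start >= 0 else 0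
--
--     # 明确的签名关键词（不包含模糊的 "thanks"）
--     # 找第一个这样明确签名的位置
--     html_lower = html_body.lower()
--     clear_sig_keywords = [
--         "mit freundlichen grüßen",
--         "best regards",
--         "kind regards",
--         "yours truly",
--         "sincerely yours",
--         "regards",
--     ]
--
--     best_pos = -1
--     for keyword in clear_sig_keywords:
--         pos = html_lower.find(keyword, search_start)
--         if pos >= 0 and (best_pos < 0 or pos < best_pos):
--             best_pos = pos
--
--     return best_pos
-- ===== SOURCE B (Python) =====
-- CLEAR_SIG_KEYWORDS = (
--     "mit freundlichen gr\u00fc\u00dfen",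
--     "best regards",
--     "kind regards",
--     "yours truly",
--     "sincerely yours",
--     "regards",
-- )
--
--
-- def _find_signature_position_in_html(html_body: str) -> int:
--     """Single left-to-right scan: return the first index at or after the
--     <body> tag where any clear signature keyword starts, else -1."""
--     if not html_body:
--         return -1
--
--     html_lower = html_body.lower()
--     body_start = html_lower.find("<body")
--     search_start = body_start if body_start >= 0 else 0
--
--     for i in range(search_start, len(html_lower)):
--         if html_lower.startswith(CLEAR_SIG_KEYWORDS, i):
--             return i
--     return -1
-- ===== Notes on version B (the rewrite author's own statement) =====
-- stated objective: alternative
-- what changed: Replaces six separate str.find scans combined by a running minimum with one left-to-right pass that returns the first index where any keyword starts (str.startswith with a tuple), i.e. leftmost-match instead of min-of-finds.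
import Mathlib
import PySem

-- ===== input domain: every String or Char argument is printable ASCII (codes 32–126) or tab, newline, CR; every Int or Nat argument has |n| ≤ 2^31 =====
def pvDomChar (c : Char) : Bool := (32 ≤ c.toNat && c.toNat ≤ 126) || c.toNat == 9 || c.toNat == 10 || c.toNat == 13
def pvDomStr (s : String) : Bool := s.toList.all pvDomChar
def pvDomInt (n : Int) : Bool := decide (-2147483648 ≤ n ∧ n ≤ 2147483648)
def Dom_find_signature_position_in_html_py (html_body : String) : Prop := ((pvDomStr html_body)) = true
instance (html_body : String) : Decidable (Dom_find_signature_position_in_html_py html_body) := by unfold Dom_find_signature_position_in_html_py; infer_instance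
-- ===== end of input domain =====

-- B replaces A's six separate find scans combined by a running minimum with one
-- left-to-right scan returning the first index where any keyword starts (objective: alternative).

-- ===== PORT A =====
-- literal transliteration of A: empty guard, body_start/search_start, then one
-- findFrom per keyword folded with the running-minimum update of best_pos.
def find_signature_position_in_html_py (html_body : String) : Int :=
  if html_body = "" then -1
  else
    let body_start := PySem.Str.find (PySem.Str.lower html_body) "<body"
    let search_start := if body_start ≥ 0 then body_start else 0
    let html_lower := PySem.Str.lower html_body
    let clear_sig_keywords : List String :=
      ["mit freundlichen grüßen", "best regards", "kind regards",
       "yours truly", "sincerely yours", "regards"]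
    clear_sig_keywords.foldl (fun best_pos keyword =>
      let pos := PySem.Str.findFrom html_lower keyword search_start
      if 0 ≤ pos ∧ (best_pos < 0 ∨ pos < best_pos) then pos else best_pos) (-1)

-- ===== PORT B =====
def pvClearSigKeywords : List String :=
  ["mit freundlichen grüßen", "best regards", "kind regards",
   "yours truly", "sincerely yours", "regards"]

-- B's `for i in range(search_start, len)` loop; `html_lower.startswith(keywords, i)` is
-- ported (exactly, since 0 ≤ i here) as a startswith test of each keyword against `L.drop i`.
def pvScan (kws : List String) (L : List Char) (i : Nat) : Int :=
  if h : i < L.length then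
    if kws.any (fun kw => PySem.Chars.startswith (L.drop i) kw.toList) then (i : Int)
    else pvScan kws L (i + 1)
  else -1
termination_by L.length - i

def find_signature_position_in_html_py_alt (html_body : String) : Int :=
  if html_body = "" then -1
  else
    let L := (PySem.Str.lower html_body).toList
    let body_start := PySem.Chars.find L ("<body".toList)
    let search_start := if body_start ≥ 0 then body_start else 0
    pvScan pvClearSigKeywords L search_start.toNat   -- search_start ≥ 0 always

-- ===== PRECONDITION & SPEC =====
def Spec_find_signature_position_in_html_py (html_body : String) (out : Int) : Prop := out = find_signature_position_in_html_py_alt html_body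
instance (html_body : String) (out : Int) : Decidable (Spec_find_signature_position_in_html_py html_body out) := by unfold Spec_find_signature_position_in_html_py; infer_instance

-- ===== CLAIM (what is proved, stated in full; the proofs are below) =====
def Claim_equal_find_signature_position_in_html_py : Prop := ∀ (html_body : String), Dom_find_signature_position_in_html_py html_body → Spec_find_signature_position_in_html_py html_body (find_signature_position_in_html_py html_body)

-- ===== LEMMAS AND PROOFS =====

lemma pv_infix_drop (L kw : List Char) (j : Nat) (h : kw <+: L.drop j) : kw <:+: L :=
  (h.isInfix).trans (List.drop_suffix j L).isInfix

-- one step of findFrom: at position s the search either matches there or restarts at s+1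
lemma pv_findFrom_step (L kw : List Char) (s : Nat) (hs : s < L.length) :
    PySem.Chars.findFrom L kw (s : Int) none =
      if kw <+: L.drop s then (s : Int) else PySem.Chars.findFrom L kw ((s + 1 : Nat) : Int) none := by
  have hsle : s ≤ L.length := le_of_lt hs
  have hs1 : s + 1 ≤ L.length := hs
  split_ifs with hpre
  · have hne : PySem.Chars.findFrom L kw (s : Int) none ≠ -1 := by
      intro h
      rw [PySem.Chars.findFrom_natCast_eq_neg_one_iff L kw s hsle] at h
      exact h hpre.isInfix
    obtain ⟨h1, h2, h3⟩ := PySem.Chars.findFrom_natCast_spec L kw s hsle hne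
    by_cases hlt : s < (PySem.Chars.findFrom L kw (s : Int) none).toNat
    · exact absurd hpre (h3 s le_rfl hlt)
    · omega
  · by_cases hv : PySem.Chars.findFrom L kw (s : Int) none = -1
    · rw [hv]
      symm
      rw [PySem.Chars.findFrom_natCast_eq_neg_one_iff L kw (s+1) hs1]
      rw [PySem.Chars.findFrom_natCast_eq_neg_one_iff L kw s hsle] at hv
      intro hinf
      apply hv
      have : L.drop (s+1) <:+ L.drop s := by
        have := List.drop_suffix 1 (L.drop s)
        rwa [List.drop_drop] at this
      exact hinf.trans this.isInfix
    · obtain ⟨h1, h2, h3⟩ := PySem.Chars.findFrom_natCast_spec L kw s hsle hv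
      set r := PySem.Chars.findFrom L kw (s : Int) none with hr
      have hns : r.toNat ≠ s := fun he => hpre (he ▸ h2)
      have hrs : s + 1 ≤ r.toNat := by omega
      have hne' : PySem.Chars.findFrom L kw ((s + 1 : Nat) : Int) none ≠ -1 := by
        intro h
        rw [PySem.Chars.findFrom_natCast_eq_neg_one_iff L kw (s+1) hs1] at h
        apply h
        apply pv_infix_drop (L.drop (s+1)) kw (r.toNat - (s+1))
        rw [List.drop_drop]
        have : s + 1 + (r.toNat - (s + 1)) = r.toNat := by omega
        rwa [this]
      obtain ⟨g1, g2, g3⟩ := PySem.Chars.findFrom_natCast_spec L kw (s+1) hs1 hne'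
      set r' := PySem.Chars.findFrom L kw ((s + 1 : Nat) : Int) none with hr'
      have hle1 : ¬ (r.toNat < r'.toNat) := fun hlt => (g3 r.toNat hrs hlt) h2
      have hle2 : ¬ (r'.toNat < r.toNat) := fun hlt => (h3 r'.toNat (by omega) hlt) g2
      omega

-- A's fold when every keyword misses from s on: best_pos stays as it was
lemma pv_fold_all_neg (ks : List String) (f : String → Int) (acc : Int)
    (hf : ∀ kw ∈ ks, f kw = -1) :
    ks.foldl (fun best kw => if 0 ≤ f kw ∧ (best < 0 ∨ f kw < best) then f kw else best) acc = acc := by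
  induction ks generalizing acc with
  | nil => rfl
  | cons k ks ih =>
      have hk := hf k (by simp)
      simp only [List.foldl_cons, hk]
      rw [if_neg (by omega)]
      exact ih acc (fun kw h => hf kw (by simp [h]))

-- A's fold when some keyword attains s and none returns anything smaller
lemma pv_fold_hit (f : String → Int) (s : Nat) :
    ∀ (ks : List String), (∀ kw ∈ ks, f kw = -1 ∨ (s : Int) ≤ f kw) →
    ∀ acc : Int, (acc = -1 ∨ (s : Int) ≤ acc) →
    (acc = (s : Int) ∨ ∃ kw ∈ ks, f kw = (s : Int)) →
    ks.foldl (fun best kw => if 0 ≤ f kw ∧ (best < 0 ∨ f kw < best) then f kw else best) acc = (s : Int) := by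
  intro ks
  induction ks with
  | nil =>
      intro _ acc _ hhit
      rcases hhit with h | ⟨kw, hmem, _⟩
      · simpa using h
      · simp at hmem
  | cons k ks ih =>
      intro hlow acc hacc hhit
      have hk := hlow k (by simp)
      have hs0 : (0 : Int) ≤ (s : Int) := by positivity
      simp only [List.foldl_cons]
      set acc' := if 0 ≤ f k ∧ (acc < 0 ∨ f k < acc) then f k else acc with hacc'
      have hlow' : ∀ kw ∈ ks, f kw = -1 ∨ (s : Int) ≤ f kw := fun kw h => hlow kw (by simp [h])
      apply ih hlow' acc'
      · rcases hk with hk | hk <;> rcases hacc with ha | ha <;>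
          simp only [hacc'] <;> split_ifs <;> omega
      · rcases hhit with ha | ⟨kw, hmem, hkw⟩
        · left; rcases hk with hk | hk <;> simp only [hacc'] <;> split_ifs <;> omega
        · rcases List.mem_cons.mp hmem with rfl | hmem'
          · left; rcases hacc with ha | ha <;> simp only [hacc'] <;> split_ifs <;> omega
          · right; exact ⟨kw, hmem', hkw⟩

-- main invariant: A's min-of-findFrom fold starting at s equals B's scan from s
lemma pv_main (ks : List String) (L : List Char)
    (hne : ∀ kw ∈ ks, kw.toList ≠ []) :
    ∀ s : Nat, s ≤ L.length →
    ks.foldl (fun best kw =>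
        if 0 ≤ PySem.Chars.findFrom L kw.toList (s : Int) none ∧
            (best < 0 ∨ PySem.Chars.findFrom L kw.toList (s : Int) none < best)
        then PySem.Chars.findFrom L kw.toList (s : Int) none else best) (-1)
      = pvScan ks L s := by
  have key : ∀ (n : Nat) (s : Nat), s ≤ L.length → L.length - s = n →
      ks.foldl (fun best kw =>
        if 0 ≤ PySem.Chars.findFrom L kw.toList (s : Int) none ∧
            (best < 0 ∨ PySem.Chars.findFrom L kw.toList (s : Int) none < best)
        then PySem.Chars.findFrom L kw.toList (s : Int) none else best) (-1)
      = pvScan ks L s := by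
    intro n
    induction n with
    | zero =>
        intro s hsle hn
        have hseq : s = L.length := by omega
        rw [pvScan]
        simp only [show ¬ (s < L.length) by omega, dif_neg, not_false_iff]
        apply pv_fold_all_neg
        intro kw hkw
        rw [PySem.Chars.findFrom_natCast_eq_neg_one_iff L kw.toList s hsle]
        intro hinf
        rw [hseq, List.drop_length] at hinf
        exact hne kw hkw (List.eq_nil_of_infix_nil hinf)
    | succ n ih =>
        intro s hsle hn
        have hs : s < L.length := by omega
        by_cases hany : ks.any (fun kw => PySem.Chars.startswith (L.drop s) kw.toList) = true
        · rw [pvScan]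
          simp only [dif_pos hs, if_pos hany]
          apply pv_fold_hit
          · intro kw hkw
            by_cases hv : PySem.Chars.findFrom L kw.toList (s : Int) none = -1
            · exact Or.inl hv
            · exact Or.inr (PySem.Chars.findFrom_natCast_spec L kw.toList s hsle hv).1
          · left; rfl
          · right
            obtain ⟨kw, hkw, hsw⟩ := List.any_eq_true.mp hany
            refine ⟨kw, hkw, ?_⟩
            rw [pv_findFrom_step L kw.toList s hs,
                if_pos ((PySem.Chars.startswith_iff _ _).mp hsw)]
        · have hnot : ∀ kw ∈ ks, ¬ kw.toList <+: L.drop s := by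
            intro kw hkw hpre
            exact hany (List.any_eq_true.mpr ⟨kw, hkw, (PySem.Chars.startswith_iff _ _).mpr hpre⟩)
          have hstep : ∀ kw ∈ ks,
              PySem.Chars.findFrom L kw.toList (s : Int) none
                = PySem.Chars.findFrom L kw.toList ((s + 1 : Nat) : Int) none := by
            intro kw hkw
            rw [pv_findFrom_step L kw.toList s hs, if_neg (hnot kw hkw)]
          rw [pvScan]
          simp only [dif_pos hs, if_neg hany]
          rw [← ih (s + 1) (by omega) (by omega)]
          apply PySem.List.foldl_congr_mem
          intro best kw hkw
          rw [hstep kw hkw]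
  intro s hsle
  exact key (L.length - s) s hsle rfl

-- ===== VERDICT (by name: the statement is the Claim_ definition above) =====
theorem find_signature_position_in_html_py_spec : Claim_equal_find_signature_position_in_html_py := by
  intro html_body _
  unfold Spec_find_signature_position_in_html_py
  by_cases he : html_body = ""
  · simp [find_signature_position_in_html_py, find_signature_position_in_html_py_alt, he]
  · rw [find_signature_position_in_html_py, find_signature_position_in_html_py_alt]
    simp only [if_neg he, PySem.Str.find_eq, PySem.Str.findFrom_eq, pvClearSigKeywords]
    set L := (PySem.Str.lower html_body).toList with hLdef
    set bs := PySem.Chars.find L ("<body".toList) with hbs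
    set ss : Int := if bs ≥ 0 then bs else 0 with hss
    have hb1 : bs ≤ (L.length : Int) := PySem.Chars.find_le_length L ("<body".toList)
    have h0 : 0 ≤ ss := by rw [hss]; split_ifs with h <;> omega
    have hle : ss ≤ (L.length : Int) := by rw [hss]; split_ifs with h <;> omega
    have hcast : ss = ((ss.toNat : Nat) : Int) := by omega
    rw [hcast]
    exact pv_main _ L (by decide) ss.toNat (by omega)
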